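-- pv_equiv track=rewrite | github.com/mmercalde/prng_cluster_public | nn_gpu_worker.py | _bucket_epochs
-- ===== SOURCE A (Python) =====
-- _EPOCH_BUCKETS = [50, 80, 100, 150, 200]
--
-- def _bucket_epochs(requested: int) -> int:
--     """
--     TB modification 2: snap requested epochs to nearest bucket within ±10.
--     Trials bucketed to the same value share max_epochs in a vmap batch.
--     """
--     for bucket in _EPOCH_BUCKETS:
--         if abs(requested - bucket) <= 10:
--             return bucket
--     for bucket in _EPOCH_BUCKETS:
--         if requested <= bucket:
--             return bucket
--     return _EPOCH_BUCKETS[-1]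
-- ===== SOURCE B (Python) =====
-- _EPOCH_BUCKETS = [50, 80, 100, 150, 200]
--
-- def _bucket_epochs(requested: int) -> int:
--     # nearest bucket (Python min keeps the first on ties, matching A's scan order)
--     best = min(_EPOCH_BUCKETS, key=lambda b: abs(requested - b))
--     if abs(requested - best) <= 10:
--         return best
--     # ceiling scan: first bucket >= requested, else the largest bucket
--     for b in _EPOCH_BUCKETS:
--         if b >= requested:
--             return b
--     return _EPOCH_BUCKETS[-1]
-- ===== Notes on version B (the rewrite author's own statement) =====
-- stated objective: alternative
-- what changed: A's first full sequential scan for a bucket within the snap tolerance is replaced by an argmin reduction (min with key=distance, first-on-ties) followed by a single threshold check; the fallback becomes a ceiling scan for the first bucket >= requested.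
import Mathlib
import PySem

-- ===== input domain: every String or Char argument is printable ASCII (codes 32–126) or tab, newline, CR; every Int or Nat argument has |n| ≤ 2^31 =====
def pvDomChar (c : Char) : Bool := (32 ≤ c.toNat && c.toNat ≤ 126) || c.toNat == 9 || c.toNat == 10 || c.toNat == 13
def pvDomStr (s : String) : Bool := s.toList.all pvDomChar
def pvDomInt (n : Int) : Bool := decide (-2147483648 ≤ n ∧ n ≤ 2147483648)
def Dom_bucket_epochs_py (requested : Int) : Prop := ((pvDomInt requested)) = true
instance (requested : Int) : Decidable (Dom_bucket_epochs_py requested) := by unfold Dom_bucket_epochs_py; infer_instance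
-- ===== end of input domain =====

-- B replaces A's first tolerance scan by an argmin reduction plus a threshold check; return-value equivalence only.
-- ===== PORT A =====
def pvBuckets : List Int := [50, 80, 100, 150, 200]

-- A's second loop: first bucket with requested <= bucket, else _EPOCH_BUCKETS[-1]
def pvCeilScanA (requested : Int) : List Int → Int
  | [] => 200
  | b :: rest => if requested ≤ b then b else pvCeilScanA requested rest

-- A's first loop: first bucket within the snap tolerance; falling through to the second loop
def pvTolScanA (requested : Int) : List Int → Int
  | [] => pvCeilScanA requested pvBuckets
  | b :: rest => if |requested - b| ≤ 10 then b else pvTolScanA requested rest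

def bucket_epochs_py (requested : Int) : Int :=
  pvTolScanA requested pvBuckets

-- ===== PORT B =====
-- B's fallback loop: first bucket >= requested, else _EPOCH_BUCKETS[-1]
def pvCeilScanB (requested : Int) : List Int → Int
  | [] => 200
  | b :: rest => if b ≥ requested then b else pvCeilScanB requested rest

-- Python's min with key keeps the first element on ties: strict < in the fold.
def bucket_epochs_py_alt (requested : Int) : Int :=
  let best := [(80 : Int), 100, 150, 200].foldl
    (fun acc b => if |requested - b| < |requested - acc| then b else acc) 50
  if |requested - best| ≤ 10 then best
  else pvCeilScanB requested pvBuckets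

-- ===== PRECONDITION & SPEC =====
def Spec_bucket_epochs_py (requested : Int) (out : Int) : Prop := out = bucket_epochs_py_alt requested
instance (requested : Int) (out : Int) : Decidable (Spec_bucket_epochs_py requested out) := by unfold Spec_bucket_epochs_py; infer_instance

-- ===== CLAIM (what is proved, stated in full; the proofs are below) =====
def Claim_equal_bucket_epochs_py : Prop := ∀ (requested : Int), Dom_bucket_epochs_py requested → Spec_bucket_epochs_py requested (bucket_epochs_py requested)

-- ===== LEMMAS AND PROOFS =====

-- ===== VERDICT (by name: the statement is the Claim_ definition above) =====
set_option maxHeartbeats 4000000 in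
theorem bucket_epochs_py_spec : Claim_equal_bucket_epochs_py := by
  intro r _
  unfold Spec_bucket_epochs_py bucket_epochs_py bucket_epochs_py_alt
  simp only [pvBuckets, pvTolScanA, pvCeilScanA, pvCeilScanB, List.foldl, ge_iff_le,
    Int.abs_eq_natAbs]
  split_ifs <;> omega
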